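-- pv_equiv track=rewrite | github.com/ch83baker/cards_eq_solver | subset_graph_classes/my_subset_graph_new.py | decode_int_to_bin_tuple
-- ===== SOURCE A (Python) =====
-- def decode_int_to_bin_tuple(code_int, num_terms):
--     """Decode integer as a characteristic tuple.
--
--     Parameters:
--     -----------
--     code_int: int
--         The int whose binary representation encodes the subset.
--     num_terms: int (positive)
--         the number of terms in your set of items
--     """
--     if code_int < 0 or code_int >= 2**num_terms:
--         raise ValueError("Outside range.")
--     output_list = []
--     for j in range(num_terms):
--         output_list.append(code_int % 2)
--         code_int = code_int // 2
--     return tuple(output_list)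
-- ===== SOURCE B (Python) =====
-- def decode_int_to_bin_tuple(code_int, num_terms):
--     """Decode integer as a characteristic tuple (LSB-first), via string formatting."""
--     if code_int < 0 or code_int >= 2**num_terms:
--         raise ValueError("Outside range.")
--     s = format(code_int, '0{}b'.format(num_terms))
--     return tuple(int(c) for c in s[::-1][:num_terms])
-- ===== Notes on version B (the rewrite author's own statement) =====
-- stated objective: idiomatic
-- what changed: B replaces the manual mod/div bit-extraction loop with Python's binary string formatting: it formats code_int as a zero-padded binary string and maps its reversed characters to ints.
-- outside the precondition, e.g. on decode_int_to_bin_tuple(0, -3): A returns (), B raises ValueError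
import Mathlib
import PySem

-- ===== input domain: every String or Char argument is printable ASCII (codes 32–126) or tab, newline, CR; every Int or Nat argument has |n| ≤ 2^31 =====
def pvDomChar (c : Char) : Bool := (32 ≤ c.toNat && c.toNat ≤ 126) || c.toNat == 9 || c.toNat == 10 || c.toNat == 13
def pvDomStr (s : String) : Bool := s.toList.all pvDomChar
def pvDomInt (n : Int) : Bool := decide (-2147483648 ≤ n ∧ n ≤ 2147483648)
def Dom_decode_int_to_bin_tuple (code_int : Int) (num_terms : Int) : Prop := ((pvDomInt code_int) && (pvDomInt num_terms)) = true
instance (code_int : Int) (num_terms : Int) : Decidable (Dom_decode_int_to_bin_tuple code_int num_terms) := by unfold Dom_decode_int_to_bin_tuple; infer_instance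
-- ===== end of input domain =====

-- B decodes the integer via its binary-string representation (format + reversed character map)
-- instead of A's repeated mod/div loop; same result on the documented domain (idiomatic rewrite).


-- ===== PORT A =====
-- the 'raise ValueError' branch is excluded by Pre_; inside Pre_ the function is the loop below
def decode_int_to_bin_tuple (code_int : Int) (num_terms : Int) : List Int :=
  ((PySem.List.pyRange 0 num_terms 1).foldl
    (fun (st : List Int × Int) _ =>
      (st.1 ++ [PySem.Int.mod st.2 2], PySem.Int.floordiv st.2 2))
    ([], code_int)).1

-- ===== PORT B =====
-- format(m, 'b'): MSB-first binary digits of m, '0' for m = 0 (exact for m : Nat)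
def pvBinStr (m : Nat) : List Char :=
  if m = 0 then ['0'] else (Nat.digits 2 m).reverse.map Nat.digitChar

-- '0{num_terms}b' zero-padding to width num_terms, then s[::-1][:num_terms] and int(c)
-- (int(c) on a binary digit char is exact as c.toNat - 48)
def decode_int_to_bin_tuple_alt (code_int : Int) (num_terms : Int) : List Int :=
  let s := pvBinStr code_int.toNat
  let padded := List.replicate (num_terms.toNat - s.length) '0' ++ s
  (padded.reverse.take num_terms.toNat).map (fun c => (c.toNat : Int) - 48)

-- ===== PRECONDITION & SPEC =====
-- Pre_ = the documented domain (docstring: num_terms positive; we also admit 0): exactly the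
-- inputs where A's guard does not raise ValueError and num_terms is non-negative.  For
-- num_terms < 0 A returns () when code_int = 0 (the guard compares against the float
-- 2**num_terms); B's format call raises ValueError there, so those inputs are excluded.
def Pre_decode_int_to_bin_tuple (code_int : Int) (num_terms : Int) : Prop :=
  0 ≤ num_terms ∧ 0 ≤ code_int ∧ code_int < 2 ^ num_terms.toNat
instance (code_int : Int) (num_terms : Int) : Decidable (Pre_decode_int_to_bin_tuple code_int num_terms) := by
  unfold Pre_decode_int_to_bin_tuple; infer_instance

def pvWitness_decode_int_to_bin_tuple : Int × Int := (5, 4)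

def Spec_decode_int_to_bin_tuple (code_int : Int) (num_terms : Int) (out : List Int) : Prop := out = decode_int_to_bin_tuple_alt code_int num_terms
instance (code_int : Int) (num_terms : Int) (out : List Int) : Decidable (Spec_decode_int_to_bin_tuple code_int num_terms out) := by unfold Spec_decode_int_to_bin_tuple; infer_instance

-- ===== CLAIM (what is proved, stated in full; the proofs are below) =====
def Claim_equal_decode_int_to_bin_tuple : Prop := ∀ (code_int : Int) (num_terms : Int), Dom_decode_int_to_bin_tuple code_int num_terms → Pre_decode_int_to_bin_tuple code_int num_terms → Spec_decode_int_to_bin_tuple code_int num_terms (decode_int_to_bin_tuple code_int num_terms)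

-- ===== LEMMAS AND PROOFS =====

-- LSB-first bit list, the common characterisation of both ports
def pvBits : Nat → Nat → List Int
  | _, 0 => []
  | m, k + 1 => ((m % 2 : Nat) : Int) :: pvBits (m / 2) k

-- A's loop ignores the range element; over any list it appends pvBits of the counter
lemma foldlA_eq (l : List Int) (acc : List Int) (m : Nat) :
    (l.foldl
      (fun (st : List Int × Int) _ =>
        (st.1 ++ [PySem.Int.mod st.2 2], PySem.Int.floordiv st.2 2))
      (acc, (m : Int))).1 = acc ++ pvBits m l.length := by
  induction l generalizing acc m with
  | nil => simp [pvBits]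
  | cons x xs ih =>
    have hmod : PySem.Int.mod (m : Int) 2 = ((m % 2 : Nat) : Int) := by
      exact_mod_cast PySem.Int.mod_natCast m 2
    have hdiv : PySem.Int.floordiv (m : Int) 2 = ((m / 2 : Nat) : Int) := by
      exact_mod_cast PySem.Int.floordiv_natCast m 2
    simp only [List.foldl_cons, List.length_cons, pvBits, hmod, hdiv]
    rw [ih]
    simp

lemma portA_eq (code_int num_terms : Int) (hc : 0 ≤ code_int) (hn : 0 ≤ num_terms) :
    decode_int_to_bin_tuple code_int num_terms = pvBits code_int.toNat num_terms.toNat := by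
  obtain ⟨m, rfl⟩ := Int.eq_ofNat_of_zero_le hc
  unfold decode_int_to_bin_tuple
  have h1 : ((PySem.List.pyRange 0 num_terms 1).length) = num_terms.toNat := by
    rw [PySem.List.length_pyRange_one]; omega
  rw [foldlA_eq, h1]; simp

-- pvBits of m below 2^k = little-endian digits padded with zeros to length k
lemma pvBits_eq_digits (k : Nat) : ∀ m : Nat, m < 2 ^ k →
    pvBits m k = (Nat.digits 2 m).map (fun d : Nat => (d : Int)) ++
      List.replicate (k - (Nat.digits 2 m).length) 0 := by
  induction k with
  | zero => intro m hm; interval_cases m; simp [pvBits]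
  | succ k ih =>
    intro m hm
    rcases Nat.eq_zero_or_pos m with h0 | hpos
    · subst h0
      have : pvBits 0 (k + 1) = 0 :: pvBits 0 k := by simp [pvBits]
      rw [this, ih 0 (by positivity)]
      simp [List.replicate_succ]
    · rw [Nat.digits_def' (by norm_num : (1:ℕ) < 2) hpos]
      have hdiv : m / 2 < 2 ^ k := by
        rw [Nat.div_lt_iff_lt_mul (by norm_num)]
        calc m < 2 ^ (k+1) := hm
        _ = 2 ^ k * 2 := by ring
      have : pvBits m (k + 1) = ((m % 2 : Nat) : Int) :: pvBits (m / 2) k := rfl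
      rw [this, ih _ hdiv]
      simp

lemma digits_lt_two (m : Nat) (d : Nat) (hd : d ∈ Nat.digits 2 m) : d < 2 :=
  Nat.digits_lt_base (by norm_num) hd

lemma portB_eq (m k : Nat) (hmk : m < 2 ^ k) :
    decode_int_to_bin_tuple_alt (m : Int) (k : Int) = pvBits m k := by
  rw [pvBits_eq_digits k m hmk]
  unfold decode_int_to_bin_tuple_alt pvBinStr
  simp only [Int.toNat_natCast]
  rcases Nat.eq_zero_or_pos m with h0 | hpos
  · subst h0
    rcases Nat.eq_zero_or_pos k with hk0 | hkpos
    · subst hk0; simp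
    · obtain ⟨k', rfl⟩ := Nat.exists_eq_succ_of_ne_zero (by omega : k ≠ 0)
      simp [List.replicate_succ, List.take_replicate, List.map_replicate]
  · have hne : m ≠ 0 := by omega
    simp only [if_neg hne]
    set ds := Nat.digits 2 m with hds
    have hlen : ds.length ≤ k := by
      rw [hds]; exact (Nat.digits_length_le_iff (by norm_num) m).mpr hmk
    have hrev : (ds.reverse.map Nat.digitChar).length = ds.length := by simp
    have hfull : (List.replicate (k - (ds.reverse.map Nat.digitChar).length) '0' ++
        ds.reverse.map Nat.digitChar).reverse =
        ds.map Nat.digitChar ++ List.replicate (k - ds.length) '0' := by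
      simp [List.reverse_replicate, List.map_reverse]
    rw [hrev] at hfull ⊢
    rw [hfull]
    have hlenfull : (ds.map Nat.digitChar ++ List.replicate (k - ds.length) '0').length = k := by
      simp; omega
    rw [List.take_of_length_le (le_of_eq hlenfull)]
    have hz : ('0'.toNat : Int) - 48 = 0 := by decide
    rw [List.map_append, List.map_replicate, List.map_map, hz]
    congr 1
    apply List.map_congr_left
    intro d hd
    have h2 : d < 2 := digits_lt_two m d (by rwa [← hds])
    interval_cases d <;> decide

-- ===== VERDICT (by name: the statement is the Claim_ definition above) =====
theorem decode_int_to_bin_tuple_spec : Claim_equal_decode_int_to_bin_tuple := by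
  intro code_int num_terms _ hpre
  obtain ⟨hn, hc, hlt⟩ := hpre
  unfold Spec_decode_int_to_bin_tuple
  rw [portA_eq _ _ hc hn]
  obtain ⟨m, rfl⟩ := Int.eq_ofNat_of_zero_le hc
  obtain ⟨k, rfl⟩ := Int.eq_ofNat_of_zero_le hn
  simp only [Int.toNat_natCast] at hlt ⊢
  rw [portB_eq m k (by exact_mod_cast hlt)]
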